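-- pv_equiv track=rewrite | github.com/kalyaniasthana/bioinformatics_coursera | ch6.py | RecursiveNumberToPattern
-- ===== SOURCE A (Python) =====
-- def NumberToSymbol(number):
-- 	d = {0: 'a', 1: 'c', 2: 'g', 3: 't'}
-- 	return d[number].upper();
--
-- def RecursiveNumberToPattern(number, k):
-- 	if k == 1:
-- 		return NumberToSymbol(number)
-- 	remainder = number%4
-- 	quotient = number//4
-- 	symbol = NumberToSymbol(remainder)
-- 	prefix = RecursiveNumberToPattern(quotient, k - 1)
-- 	return prefix + symbol
-- ===== SOURCE B (Python) =====
-- def RecursiveNumberToPattern(number, k):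
--     syms = "ACGT"
--     out = []
--     for _ in range(k - 1):
--         out.append(syms[number % 4])
--         number //= 4
--     out.append(syms[number])
--     return ''.join(reversed(out))
-- ===== Notes on version B (the rewrite author's own statement) =====
-- stated objective: alternative
-- what changed: Replaces the recursion over k (which builds the string by repeated concatenation prefix+symbol) with a flat iterative loop that extracts base-4 digits LSB-first into a list, then reverses and joins it.
import Mathlib
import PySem

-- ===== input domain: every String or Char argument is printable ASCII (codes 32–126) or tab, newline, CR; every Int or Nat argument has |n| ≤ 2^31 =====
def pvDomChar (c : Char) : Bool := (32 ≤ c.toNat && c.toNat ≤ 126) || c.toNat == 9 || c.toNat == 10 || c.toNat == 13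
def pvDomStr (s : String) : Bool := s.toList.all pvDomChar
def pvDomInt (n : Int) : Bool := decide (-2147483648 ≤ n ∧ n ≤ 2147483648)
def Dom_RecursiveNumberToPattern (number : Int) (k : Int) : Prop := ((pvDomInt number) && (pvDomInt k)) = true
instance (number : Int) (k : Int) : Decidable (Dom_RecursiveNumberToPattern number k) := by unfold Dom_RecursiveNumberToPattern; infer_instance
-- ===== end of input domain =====

-- B replaces the recursion over k with a flat loop extracting base-4 digits LSB-first, then reverse+join (alternative decomposition).

-- ===== PORT A =====
-- d[number].upper(): getD "" is a totality guard only — Python raises KeyError there (outside Pre_)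
def pvNumberToSymbol (number : Int) : String :=
  let d : PySem.Dict Int String := PySem.Dict.ofList [(0, "a"), (1, "c"), (2, "g"), (3, "t")]
  PySem.Str.upper (PySem.Dict.getD d number "")

-- recursion on k, carried as a Nat; the 0 case is a totality guard only (Python diverges for k ≤ 0, outside Pre_)
def pvRecNTPAux (number : Int) : Nat → String
  | 0 => ""
  | 1 => pvNumberToSymbol number
  | (n + 2) =>
    let remainder := PySem.Int.mod number 4
    let quotient := PySem.Int.floordiv number 4
    let symbol := pvNumberToSymbol remainder
    let prfx := pvRecNTPAux quotient (n + 1)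
    prfx ++ symbol

def RecursiveNumberToPattern (number : Int) (k : Int) : String :=
  pvRecNTPAux number k.toNat

-- ===== PORT B =====
-- syms[i]: getD 'A' is a totality guard only — Python raises IndexError there (outside Pre_)
def pvSym (i : Int) : String := ((PySem.Str.pyGet? "ACGT" i).getD 'A').toString

def RecursiveNumberToPattern_alt (number : Int) (k : Int) : String :=
  let st := (PySem.List.pyRange 0 (k - 1) 1).foldl
      (fun (st : List String × Int) (_ : Int) =>
        (st.1 ++ [pvSym (PySem.Int.mod st.2 4)], PySem.Int.floordiv st.2 4))
      ([], number)
  PySem.Str.join "" (st.1 ++ [pvSym st.2]).reverse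

-- ===== PRECONDITION & SPEC =====
-- Pre_ is exactly where Python A returns: k ≥ 1 (else infinite recursion) and
-- 0 ≤ number < 4^k (else the base case's dict lookup raises KeyError).
def Pre_RecursiveNumberToPattern (number : Int) (k : Int) : Prop :=
  1 ≤ k ∧ 0 ≤ number ∧ number < 4 ^ k.toNat
instance (number : Int) (k : Int) : Decidable (Pre_RecursiveNumberToPattern number k) := by
  unfold Pre_RecursiveNumberToPattern; infer_instance

def pvWitness_RecursiveNumberToPattern : Int × Int := (11, 2)

def Spec_RecursiveNumberToPattern (number : Int) (k : Int) (out : String) : Prop := out = RecursiveNumberToPattern_alt number k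
instance (number : Int) (k : Int) (out : String) : Decidable (Spec_RecursiveNumberToPattern number k out) := by unfold Spec_RecursiveNumberToPattern; infer_instance

-- ===== CLAIM (what is proved, stated in full; the proofs are below) =====
def Claim_equal_RecursiveNumberToPattern : Prop := ∀ (number : Int) (k : Int), Dom_RecursiveNumberToPattern number k → Pre_RecursiveNumberToPattern number k → Spec_RecursiveNumberToPattern number k (RecursiveNumberToPattern number k)

-- ===== LEMMAS AND PROOFS =====

-- the B loop body, named for the proof (definitionally the lambda in the port)
def pvStep (st : List String × Int) : List String × Int :=
  (st.1 ++ [pvSym (PySem.Int.mod st.2 4)], PySem.Int.floordiv st.2 4)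

-- LSB-first digit symbols and leftover quotient after m loop iterations
def pvLsb (number : Int) : Nat → List String
  | 0 => []
  | n + 1 => pvSym (PySem.Int.mod number 4) :: pvLsb (PySem.Int.floordiv number 4) n

def pvQuot (number : Int) : Nat → Int
  | 0 => number
  | n + 1 => pvQuot (PySem.Int.floordiv number 4) n

lemma pvFoldl_const {α β : Type} (g : α → α) (l : List β) (init : α) :
    l.foldl (fun s _ => g s) init = g^[l.length] init := by
  induction l generalizing init with
  | nil => rfl
  | cons b t ih => simp [List.foldl_cons, ih, Function.iterate_succ_apply]

lemma pvStep_iterate (m : Nat) : ∀ (acc : List String) (number : Int),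
    pvStep^[m] (acc, number) = (acc ++ pvLsb number m, pvQuot number m) := by
  induction m with
  | zero => intro acc number; simp [pvQuot, pvLsb]
  | succ n ih =>
    intro acc number
    rw [Function.iterate_succ_apply]
    show pvStep^[n] (pvStep (acc, number)) = _
    rw [pvStep, ih]
    simp [pvLsb, pvQuot]

lemma pvMod4 (n : Int) : PySem.Int.mod n 4 = n % 4 := by
  simp [PySem.Int.mod, Int.fmod_eq_emod]

lemma pvMod4_range (n : Int) : 0 ≤ PySem.Int.mod n 4 ∧ PySem.Int.mod n 4 < 4 := by
  rw [pvMod4]; omega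

lemma pvFloordiv4 (n : Int) : PySem.Int.floordiv n 4 = n / 4 := by
  simp [PySem.Int.floordiv, Int.fdiv_eq_ediv]

lemma pvSym_eq (r : Int) (h0 : 0 ≤ r) (h4 : r < 4) : pvNumberToSymbol r = pvSym r := by
  interval_cases r <;> decide

lemma pvJoin_empty_append_chars (L : List (List Char)) (s : List Char) :
    PySem.Chars.join [] (L ++ [s]) = PySem.Chars.join [] L ++ s := by
  induction L with
  | nil => simp [PySem.Chars.join_nil, PySem.Chars.join_singleton]
  | cons p t ih =>
    cases t with
    | nil => simp [PySem.Chars.join_singleton, PySem.Chars.join_cons_cons]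
    | cons q r =>
      have h1 : (p :: q :: r) ++ [s] = p :: q :: (r ++ [s]) := by simp
      rw [h1, PySem.Chars.join_cons_cons, ← List.cons_append, ih,
          PySem.Chars.join_cons_cons]
      simp

lemma pvJoin_empty_append (L : List String) (s : String) :
    PySem.Str.join "" (L ++ [s]) = PySem.Str.join "" L ++ s := by
  apply String.toList_inj.mp
  rw [String.toList_append]
  simp only [PySem.Str.toList_join, List.map_append, List.map_cons, List.map_nil]
  have : ("" : String).toList = [] := rfl
  rw [this, pvJoin_empty_append_chars]

-- the key bridge: A's recursion equals B's reversed-digit join, for m+1 digits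
lemma pvKey : ∀ (m : Nat) (number : Int), 0 ≤ number → number < 4 ^ (m + 1) →
    pvRecNTPAux number (m + 1) =
      PySem.Str.join "" ((pvLsb number m ++ [pvSym (pvQuot number m)]).reverse) := by
  intro m
  induction m with
  | zero =>
    intro number h0 h4
    have hmod : PySem.Int.mod number 4 = number := by rw [pvMod4]; omega
    have h4' : number < 4 := by simpa using h4
    rw [show pvRecNTPAux number 1 = pvNumberToSymbol number from rfl,
        pvSym_eq number h0 h4']
    simp only [pvLsb, pvQuot, List.nil_append, List.reverse_singleton]
    apply String.toList_inj.mp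
    simp [PySem.Str.toList_join, PySem.Chars.join_singleton]
  | succ n ih =>
    intro number h0 hlt
    have hq0 : 0 ≤ number / 4 := Int.ediv_nonneg h0 (by norm_num)
    have hqlt : number / 4 < 4 ^ (n + 1) := by
      rw [Int.ediv_lt_iff_lt_mul (by norm_num : (0:ℤ) < 4)]
      calc number < 4 ^ (n + 1 + 1) := hlt
        _ = 4 ^ (n + 1) * 4 := by ring
    have hmod := pvMod4_range number
    have hA : pvRecNTPAux number (n + 2) =
        pvRecNTPAux (PySem.Int.floordiv number 4) (n + 1)
          ++ pvNumberToSymbol (PySem.Int.mod number 4) := rfl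
    rw [hA, pvSym_eq _ hmod.1 hmod.2, pvFloordiv4,
        ih (number / 4) hq0 hqlt]
    have hlsb : pvLsb number (n + 1) =
        pvSym (PySem.Int.mod number 4) :: pvLsb (PySem.Int.floordiv number 4) n := rfl
    have hquot : pvQuot number (n + 1) = pvQuot (PySem.Int.floordiv number 4) n := rfl
    rw [hlsb, hquot, pvFloordiv4]
    rw [List.cons_append, List.reverse_cons,
        pvJoin_empty_append]

-- ===== VERDICT (by name: the statement is the Claim_ definition above) =====
theorem RecursiveNumberToPattern_spec : Claim_equal_RecursiveNumberToPattern := by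
  intro number k _ hPre
  obtain ⟨hk, h0, hlt⟩ := hPre
  unfold Spec_RecursiveNumberToPattern
  obtain ⟨m, hm⟩ : ∃ m : Nat, k.toNat = m + 1 := ⟨k.toNat - 1, by omega⟩
  have hlen : (PySem.List.pyRange 0 (k - 1) 1).length = m := by
    rw [PySem.List.length_pyRange_one]; omega
  have hstep : RecursiveNumberToPattern_alt number k =
      PySem.Str.join "" (((pvStep^[m] ([], number)).1
        ++ [pvSym (pvStep^[m] ([], number)).2]).reverse) := by
    unfold RecursiveNumberToPattern_alt
    rw [show (fun (st : List String × Int) (_ : Int) =>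
        (st.1 ++ [pvSym (PySem.Int.mod st.2 4)], PySem.Int.floordiv st.2 4))
        = (fun st _ => pvStep st) from rfl]
    rw [pvFoldl_const, hlen]
  rw [hstep, pvStep_iterate]
  simp only [List.nil_append]
  rw [show RecursiveNumberToPattern number k = pvRecNTPAux number (m + 1) by
    unfold RecursiveNumberToPattern; rw [hm]]
  exact pvKey m number h0 (by rw [← hm]; exact hlt)
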